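-- pv_equiv track=rewrite | github.com/HawamahFayyaz/Physical_AI_Humanoid_Robotics | backend/scripts/ingest_content.py | find_code_block_ranges
-- ===== SOURCE A (Python) =====
-- from typing import List, Optional, Tuple
--
-- def find_code_block_ranges(text: str) -> List[Tuple[int, int]]:
--     """Find start and end positions of code blocks in text.
--
--     Returns:
--         List of (start, end) character positions of code blocks
--     """
--     ranges = []
--     in_code = False
--     start_pos = 0
--
--     lines = text.split("\n")
--     pos = 0
--
--     for line in lines:
--         if line.startswith("```"):
--             if not in_code:
--                 in_code = True
--                 start_pos = pos
--             else:
--                 in_code = False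
--                 ranges.append((start_pos, pos + len(line)))
--         pos += len(line) + 1  # +1 for newline
--
--     return ranges
-- ===== SOURCE B (Python) =====
-- def find_code_block_ranges(text):
--     """Two-pass: index all fence lines first, then pair consecutive fences."""
--     fences = []
--     pos = 0
--     for line in text.split("\n"):
--         end = pos + len(line)
--         if line.startswith("```"):
--             fences.append((pos, end))
--         pos = end + 1
--     return [(fences[i][0], fences[i + 1][1]) for i in range(0, len(fences) - 1, 2)]
-- ===== Notes on version B (the rewrite author's own statement) =====
-- stated objective: alternative
-- what changed: Replaces A's single stateful pass (in_code flag + running offset) by a two-pass scheme: first build an index of all fence-line (start,end) offsets, then pair consecutive fences two at a time, dropping an unpaired trailing fence.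
import Mathlib
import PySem

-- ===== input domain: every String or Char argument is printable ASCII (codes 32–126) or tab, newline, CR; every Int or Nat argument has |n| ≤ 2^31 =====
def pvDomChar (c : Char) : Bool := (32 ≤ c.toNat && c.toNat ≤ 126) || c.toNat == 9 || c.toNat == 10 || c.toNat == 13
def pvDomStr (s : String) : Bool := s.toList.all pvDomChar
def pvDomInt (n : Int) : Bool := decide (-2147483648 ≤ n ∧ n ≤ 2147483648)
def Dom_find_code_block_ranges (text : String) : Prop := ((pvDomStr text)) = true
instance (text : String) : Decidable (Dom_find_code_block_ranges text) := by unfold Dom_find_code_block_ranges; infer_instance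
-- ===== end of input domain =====

-- B replaces A's stateful single pass by a fence-index pass plus a pairing pass (alternative decomposition, same cost).

-- ===== PORT A =====
-- A's loop over lines with state (ranges, in_code, start_pos, pos)
def loopA : List (List Char) → List (Int × Int) → Bool → Int → Int → List (Int × Int)
  | [], ranges, _, _, _ => ranges
  | line :: rest, ranges, in_code, start_pos, pos =>
    if PySem.Chars.startswith line ['`','`','`'] then
      if !in_code then
        loopA rest ranges true pos (pos + PySem.Chars.len line + 1)
      else
        loopA rest (ranges ++ [(start_pos, pos + PySem.Chars.len line)]) false start_pos
          (pos + PySem.Chars.len line + 1)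
    else
      loopA rest ranges in_code start_pos (pos + PySem.Chars.len line + 1)

def find_code_block_ranges (text : String) : List (Int × Int) :=
  loopA (PySem.Chars.splitOn text.toList ['\n']) [] false 0 0

-- ===== PORT B =====
-- pass 1: (start, end) offsets of every line starting with ```
def fenceIndex : List (List Char) → Int → List (Int × Int)
  | [], _ => []
  | line :: rest, pos =>
    let rest' := fenceIndex rest (pos + PySem.Chars.len line + 1)
    if PySem.Chars.startswith line ['`','`','`'] then (pos, pos + PySem.Chars.len line) :: rest' else rest'

-- pass 2: pair consecutive fences, two at a time (B's step-2 comprehension)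
def pairUp : List (Int × Int) → List (Int × Int)
  | a :: b :: rest => (a.1, b.2) :: pairUp rest
  | _ => []

def find_code_block_ranges_alt (text : String) : List (Int × Int) :=
  pairUp (fenceIndex (PySem.Chars.splitOn text.toList ['\n']) 0)

-- ===== PRECONDITION & SPEC =====
def Spec_find_code_block_ranges (text : String) (out : List (Int × Int)) : Prop := out = find_code_block_ranges_alt text
instance (text : String) (out : List (Int × Int)) : Decidable (Spec_find_code_block_ranges text out) := by unfold Spec_find_code_block_ranges; infer_instance

-- ===== CLAIM (what is proved, stated in full; the proofs are below) =====
def Claim_equal_find_code_block_ranges : Prop := ∀ (text : String), Dom_find_code_block_ranges text → Spec_find_code_block_ranges text (find_code_block_ranges text)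

-- ===== LEMMAS AND PROOFS =====

-- what A's loop yields while inside a code block that opened at s
def pairOdd (s : Int) : List (Int × Int) → List (Int × Int)
  | [] => []
  | b :: rest => (s, b.2) :: pairUp rest

theorem loopA_eq (lines : List (List Char)) :
    ∀ (ranges : List (Int × Int)) (in_code : Bool) (s pos : Int),
      loopA lines ranges in_code s pos =
        ranges ++ (if in_code then pairOdd s (fenceIndex lines pos)
                   else pairUp (fenceIndex lines pos)) := by
  induction lines with
  | nil => intro ranges in_code s pos; cases in_code <;> simp [loopA, fenceIndex, pairUp, pairOdd]
  | cons line rest ih =>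
    intro ranges in_code s pos
    by_cases h : PySem.Chars.startswith line ['`','`','`'] = true <;> cases in_code <;>
      simp only [loopA, fenceIndex, h, ih, Bool.not_false, Bool.not_true, if_true, if_false,
        List.append_assoc, List.append_cancel_left_eq] <;>
      cases fenceIndex rest (pos + PySem.Chars.len line + 1) <;>
      simp [pairUp, pairOdd]

-- ===== VERDICT (by name: the statement is the Claim_ definition above) =====
theorem find_code_block_ranges_spec : Claim_equal_find_code_block_ranges := by
  intro text _
  unfold Spec_find_code_block_ranges find_code_block_ranges find_code_block_ranges_alt
  simp [loopA_eq]
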